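-- pv_equiv track=rewrite | github.com/Agilulfo/pyAoC2023 | advent/day12/records.py | count_fits
-- ===== SOURCE A (Python) =====
-- def count_fits(record, broken_sequence_len):
--     first_broken = None
--     last_broken = None
--     gap_point = False
--
--     for index, status in enumerate(record):
--         match status:
--             case ".":
--                 if first_broken is not None:
--                     gap_point = True
--             case "#":
--                 if first_broken is not None:
--                     last_broken = index
--                     if (
--                         gap_point
--                         or last_broken - first_broken + 1 > broken_sequence_len
--                     ):
--                         return 0
--
--                 else:
--                     first_broken = index
--                     last_broken = index
--
--     search_area = None
--     if first_broken is not None: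
--         search_area = record[
--             max(0, last_broken - broken_sequence_len + 1) : first_broken
--             + broken_sequence_len
--         ]
--     else:
--         search_area = record
--
--     contigious_counter = 0
--     fits_counter = 0
--
--     for index, status in enumerate(search_area):
--         if status != ".":
--             contigious_counter += 1
--         else:
--             contigious_counter = 0
--
--         if contigious_counter >= broken_sequence_len:
--             fits_counter += 1
--
--     return fits_counter
-- ===== SOURCE B (Python) =====
-- def count_fits(record, broken_sequence_len):
--     hashes = [i for i, c in enumerate(record) if c == "#"]
--     fits_counter = 0
--     for j in range(len(record)):
--         start = j - broken_sequence_len + 1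
--         if start < 0:
--             continue
--         if "." in record[start:j + 1]:
--             continue
--         if hashes and (hashes[0] < start or hashes[-1] > j):
--             continue
--         fits_counter += 1
--     return fits_counter
-- ===== Notes on version B (the rewrite author's own statement) =====
-- stated objective: alternative
-- what changed: Replaces A's three-phase span analysis (first/last-'#' scan with early returns, search-area slice, sliding run counter) by a direct enumeration of candidate windows: collect the '#' indices once, then for every end index j count the window of length L ending at j iff it is in bounds, dot-free, and contains all '#' positions.
-- intended difference: For negative broken_sequence_len with exactly one '#' at index f where f+L<0 and len(record)+2*L-1>0, Python wraps A's negative slice end 'first+L' around, so A returns the phantom count len+2*L-1 (e.g. 1 on ('#xxx', -1)); B returns 0, the intended count since no window of negative length can cover the '#'. — e.g. on count_fits("#xxx", -1): A returns 1, B returns 0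
import Mathlib
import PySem

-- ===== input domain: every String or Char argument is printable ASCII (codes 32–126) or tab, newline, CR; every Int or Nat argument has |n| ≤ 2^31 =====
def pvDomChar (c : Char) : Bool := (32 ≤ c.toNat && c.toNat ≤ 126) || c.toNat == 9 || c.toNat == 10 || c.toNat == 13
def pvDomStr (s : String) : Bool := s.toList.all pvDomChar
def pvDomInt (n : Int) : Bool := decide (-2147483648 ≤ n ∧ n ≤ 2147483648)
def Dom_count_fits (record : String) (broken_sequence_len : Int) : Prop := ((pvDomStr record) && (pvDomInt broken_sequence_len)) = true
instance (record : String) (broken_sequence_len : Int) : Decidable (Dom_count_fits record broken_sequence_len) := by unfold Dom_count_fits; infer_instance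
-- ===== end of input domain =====

-- B replaces A's three-phase span analysis (first/last-'#' scan with early returns, search-area
-- slice, sliding run counter) by a direct enumeration of candidate windows (objective: alternative;
-- same return value except on the D_ region below, where A's negative slice end wraps around).

-- ===== PORT A =====
-- first loop of A: returns none exactly where A executes 'return 0'
def cfScan (L : Int) : List (Int × Char) → Option Int × Option Int × Bool → Option (Option Int × Option Int × Bool)
  | [], st => some st
  | (index, status) :: rest, (fb, lb, gp) =>
    if status = '.' then
      cfScan L rest (fb, lb, if fb.isSome then true else gp)
    else if status = '#' then
      match fb with
      | some first =>
          if gp || decide (index - first + 1 > L) then none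
          else cfScan L rest (fb, some index, gp)
      | none => cfScan L rest (some index, some index, gp)
    else cfScan L rest (fb, lb, gp)

-- second loop of A: contigious_counter / fits_counter
def cfRuns (L : Int) : List Char → Int → Int → Int
  | [], _, fits => fits
  | status :: rest, cont, fits =>
    let cont' := if status ≠ '.' then cont + 1 else 0
    cfRuns L rest cont' (if cont' ≥ L then fits + 1 else fits)

def count_fits (record : String) (broken_sequence_len : Int) : Int :=
  match cfScan broken_sequence_len (PySem.List.enumerate record.toList 0) (none, none, false) with
  | none => 0
  | some (fb, lb, _gp) =>
    let search_area : List Char :=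
      match fb, lb with
      | some first, some last =>
          PySem.List.slice record.toList (some (max 0 (last - broken_sequence_len + 1)))
            (some (first + broken_sequence_len))
      | _, _ => record.toList   -- Python: first_broken is None (last_broken is only ever set with it)
    cfRuns broken_sequence_len search_area 0 0

-- ===== PORT B =====
def count_fits_alt (record : String) (broken_sequence_len : Int) : Int :=
  let cs := record.toList
  let hashes : List Int := ((PySem.List.enumerate cs 0).filter (fun ic => ic.2 == '#')).map (fun ic => ic.1)
  (PySem.List.pyRange 0 (PySem.List.len cs) 1).foldl
    (fun fits j =>
      let start := j - broken_sequence_len + 1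
      if start < 0 then fits
      else if PySem.Chars.isIn ['.'] (PySem.List.slice cs (some start) (some (j + 1))) then fits
      else if hashes ≠ [] ∧ (PySem.List.pyGetD hashes 0 0 < start ∨ PySem.List.pyGetD hashes (-1) 0 > j) then fits
      else fits + 1) 0

-- ===== PRECONDITION & SPEC =====
-- For negative broken_sequence_len with a single '#' (at index f with f + L < 0 and
-- len + 2L - 1 > 0), A's slice end 'first + L' is negative and Python wraps it around, so A
-- returns the phantom count len + 2L - 1; B returns 0, the intended count since no window of
-- negative length can cover the '#'.
def D_count_fits (record : String) (broken_sequence_len : Int) : Prop :=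
  broken_sequence_len < 0 ∧
  record.toList.count '#' = 1 ∧
  (∀ k < record.toList.length, record.toList.getD k ' ' = '#' → (k : Int) + broken_sequence_len < 0) ∧
  0 < (record.toList.length : Int) + 2 * broken_sequence_len - 1
instance (record : String) (broken_sequence_len : Int) : Decidable (D_count_fits record broken_sequence_len) := by
  unfold D_count_fits; infer_instance

def Spec_count_fits (record : String) (broken_sequence_len : Int) (out : Int) : Prop :=
  ¬ D_count_fits record broken_sequence_len → out = count_fits_alt record broken_sequence_len
instance (record : String) (broken_sequence_len : Int) (out : Int) : Decidable (Spec_count_fits record broken_sequence_len out) := by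
  unfold Spec_count_fits; infer_instance

def pvDiffWitness_count_fits : String × Int := ("#xxx", -1)
def pvDiffWitnessOut_count_fits : Int × Int := (1, 0)

-- ===== CLAIM (what is proved, stated in full; the proofs are below) =====
def Claim_unchanged_count_fits : Prop := ∀ (record : String) (broken_sequence_len : Int), Dom_count_fits record broken_sequence_len → Spec_count_fits record broken_sequence_len (count_fits record broken_sequence_len)
def Claim_changed_count_fits : Prop := Dom_count_fits (pvDiffWitness_count_fits.1) (pvDiffWitness_count_fits.2) ∧ D_count_fits (pvDiffWitness_count_fits.1) (pvDiffWitness_count_fits.2) ∧ count_fits (pvDiffWitness_count_fits.1) (pvDiffWitness_count_fits.2) = pvDiffWitnessOut_count_fits.1 ∧ count_fits_alt (pvDiffWitness_count_fits.1) (pvDiffWitness_count_fits.2) = pvDiffWitnessOut_count_fits.2 ∧ pvDiffWitnessOut_count_fits.1 ≠ pvDiffWitnessOut_count_fits.2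
def Claim_exact_count_fits : Prop := ∀ (record : String) (broken_sequence_len : Int), Dom_count_fits record broken_sequence_len → D_count_fits record broken_sequence_len → count_fits record broken_sequence_len ≠ count_fits_alt record broken_sequence_len

-- ===== LEMMAS AND PROOFS =====

-- the common specification: j is counted iff the block window ending at j is in bounds,
-- dot-free, and contains every '#'
def fitsAt (L : Int) (cs : List Char) (j : Nat) : Bool :=
  decide (0 ≤ (j : Int) - L + 1
    ∧ (∀ k < j + 1, (j : Int) - L + 1 ≤ (k : Int) → cs.getD k ' ' ≠ '.')
    ∧ (∀ p < cs.length, cs.getD p ' ' = '#' → (j : Int) - L + 1 ≤ (p : Int) ∧ (p : Int) ≤ (j : Int)))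

def fitsCount (L : Int) (cs : List Char) : Int :=
  ((List.range cs.length).countP (fitsAt L cs) : Int)

def hashesList (cs : List Char) : List Int :=
  ((PySem.List.enumerate cs 0).filter (fun ic => ic.2 == '#')).map (fun ic => ic.1)

theorem mem_hashesList (cs : List Char) (x : Int) :
    x ∈ hashesList cs ↔ ∃ k : Nat, k < cs.length ∧ x = (k : Int) ∧ cs.getD k ' ' = '#' := by
  simp only [hashesList, List.mem_map, List.mem_filter, PySem.List.mem_enumerate_iff]
  constructor
  · rintro ⟨⟨i, c⟩, ⟨⟨k, hk, hkc⟩, hc⟩, rfl⟩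
    cases hkc
    exact ⟨k, hk, by simp, by simp_all [List.getD_eq_getElem?_getD]⟩
  · rintro ⟨k, hk, rfl, hch⟩
    exact ⟨((k : Int), cs[k]), ⟨⟨k, hk, by simp⟩, by
      simp_all [List.getD_eq_getElem?_getD]⟩, rfl⟩

theorem hashesList_sorted (cs : List Char) : (hashesList cs).Pairwise (· < ·) := by
  unfold hashesList
  exact List.pairwise_map.mpr ((PySem.List.pairwise_lt_enumerate cs 0).filter _) |>.imp (by simp)

theorem le_getLast_of_pairwise_lt (l : List Int) (hne : l ≠ []) (hp : l.Pairwise (· < ·)) :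
    ∀ x ∈ l, x ≤ l.getLast hne := by
  induction l with
  | nil => simp
  | cons h t ih =>
    intro x hx
    cases t with
    | nil => simp_all
    | cons a t' =>
      rw [List.getLast_cons (by simp)]
      rcases List.mem_cons.mp hx with rfl | hx'
      · have h1 := List.rel_of_pairwise_cons hp (List.getLast_mem (l := a :: t') (by simp))
        exact le_of_lt h1
      · exact ih (by simp) hp.of_cons x hx'

theorem dot_in_slice (cs : List Char) (a b : Int) (ha : 0 ≤ a) (hb : 0 ≤ b) :
    PySem.Chars.isIn ['.'] (PySem.List.slice cs (some a) (some b)) = true ↔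
      ∃ i : Nat, a ≤ (i : Int) ∧ (i : Int) < b ∧ i < cs.length ∧ cs.getD i ' ' = '.' := by
  rw [PySem.Chars.isIn_iff_infix, List.singleton_infix_iff, PySem.List.slice_toNat cs ha hb,
    List.mem_iff_getElem]
  constructor
  · rintro ⟨i, hi, hget⟩
    simp only [List.length_take, List.length_drop] at hi
    rw [List.getElem_take, List.getElem_drop] at hget
    refine ⟨a.toNat + i, by omega, by omega, by omega, ?_⟩
    rw [List.getD_eq_getElem cs ' ' (by omega)]
    exact hget
  · rintro ⟨i, hai, hib, hin, hd⟩
    refine ⟨i - a.toNat, by simp only [List.length_take, List.length_drop]; omega, ?_⟩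
    rw [List.getElem_take, List.getElem_drop]
    rw [List.getD_eq_getElem cs ' ' hin] at hd
    convert hd using 2
    omega

theorem alt_eq_fitsCount (record : String) (L : Int) :
    count_fits_alt record L = fitsCount L record.toList := by
  simp only [count_fits_alt, fitsCount]
  rw [PySem.List.len_eq, PySem.List.pyRange_one]
  simp only [Int.sub_zero, Int.toNat_natCast]
  rw [List.foldl_map]
  refine Eq.trans (PySem.List.foldl_congr_mem _ _
    (fun fits (k : Nat) => if fitsAt L record.toList k then fits + 1 else fits) _ ?_) ?_
  swap
  · rw [PySem.List.foldl_if_add_one]; simp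
  · intro fits k hk
    have hk' : k < record.toList.length := List.mem_range.mp hk
    set cs := record.toList with hcs
    simp only [Int.zero_add]
    by_cases hf : fitsAt L cs k = true
    · have hprop := of_decide_eq_true hf
      obtain ⟨h1, h2, h3⟩ := hprop
      rw [if_neg (by omega), if_neg ?_, if_neg ?_, if_pos hf]
      · rintro ⟨hne, hor⟩
        cases hl : hashesList cs with
        | nil => rw [show ((PySem.List.enumerate cs 0).filter (fun ic => ic.2 == '#')).map (fun ic => ic.1) = hashesList cs from rfl, hl] at hne; exact hne rfl
        | cons h0 t =>
          rw [show ((PySem.List.enumerate cs 0).filter (fun ic => ic.2 == '#')).map (fun ic => ic.1) = hashesList cs from rfl, hl] at hor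
          rw [PySem.List.pyGetD_zero_cons, PySem.List.pyGetD_neg_one (h0 :: t) 0 (by simp)] at hor
          have hh0 : h0 ∈ hashesList cs := by rw [hl]; exact List.mem_cons_self ..
          have hhl : (h0 :: t).getLast (by simp) ∈ hashesList cs := by
            rw [hl]; exact List.getLast_mem _
          obtain ⟨p0, hp0n, rfl, hp0h⟩ := (mem_hashesList cs _).mp hh0
          obtain ⟨pl, hpln, hple, hplh⟩ := (mem_hashesList cs _).mp hhl
          obtain ⟨hb1, hb2⟩ := h3 p0 hp0n hp0h
          obtain ⟨hc1, hc2⟩ := h3 pl hpln hplh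
          rw [hple] at hor
          rcases hor with h | h <;> omega
      · intro hin
        obtain ⟨i, hia, hib, hin, hid⟩ := (dot_in_slice cs _ _ (by omega) (by omega)).mp hin
        exact h2 i (by omega) (by omega) hid
    · rw [if_neg hf]
      by_cases hs : (k : Int) - L + 1 < 0
      · rw [if_pos hs]
      rw [if_neg hs]
      by_cases hdot : PySem.Chars.isIn ['.'] (PySem.List.slice cs (some ((k:Int) - L + 1)) (some ((k:Int) + 1))) = true
      · rw [if_pos hdot]
      rw [if_neg hdot]
      rw [if_pos ?_]
      have h2 : ∀ kk < k + 1, (k : Int) - L + 1 ≤ (kk : Int) → cs.getD kk ' ' ≠ '.' := by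
        intro kk hkk hkkL hkkd
        exact hdot ((dot_in_slice cs _ _ (by omega) (by omega)).mpr ⟨kk, hkkL, by omega, by omega, hkkd⟩)
      have h3 : ¬ (∀ p < cs.length, cs.getD p ' ' = '#' → (k : Int) - L + 1 ≤ (p : Int) ∧ (p : Int) ≤ (k : Int)) := by
        intro h3
        exact hf (decide_eq_true ⟨by omega, h2, h3⟩)
      push Not at h3
      obtain ⟨p, hpn, hph, hout⟩ := h3
      have hpmem : ((p : Nat) : Int) ∈ hashesList cs := (mem_hashesList cs _).mpr ⟨p, hpn, rfl, hph⟩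
      cases hl : hashesList cs with
      | nil => rw [hl] at hpmem; simp at hpmem
      | cons h0 t =>
        constructor
        · rw [show ((PySem.List.enumerate cs 0).filter (fun ic => ic.2 == '#')).map (fun ic => ic.1) = hashesList cs from rfl, hl]; simp
        rw [show ((PySem.List.enumerate cs 0).filter (fun ic => ic.2 == '#')).map (fun ic => ic.1) = hashesList cs from rfl, hl]
        rw [PySem.List.pyGetD_zero_cons, PySem.List.pyGetD_neg_one (h0 :: t) 0 (by simp)]
        rw [hl] at hpmem
        have hhead : h0 ≤ (p : Int) := by
          rcases List.mem_cons.mp hpmem with rfl | hx'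
          · omega
          · exact le_of_lt (List.rel_of_pairwise_cons (hl ▸ hashesList_sorted cs) hx')
        have hlast : (p : Int) ≤ (h0 :: t).getLast (by simp) :=
          le_getLast_of_pairwise_lt _ (by simp) (hl ▸ hashesList_sorted cs) _ hpmem
        by_cases hlt : (k : Int) - L + 1 ≤ (p : Int)
        · right; have := hout hlt; omega
        · left; omega

theorem countP_range_succ (n : Nat) (p : Nat → Bool) :
    (List.range (n+1)).countP p = (if p 0 then 1 else 0) + (List.range n).countP (fun j => p (j+1)) := by
  rw [List.range_succ_eq_map, List.countP_cons, List.countP_map]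
  by_cases h : p 0 <;> simp [h, Nat.add_comm, Function.comp_def, Nat.succ_eq_add_one]

def pRun (L c : Int) (xs : List Char) (j : Nat) : Bool :=
  decide (L ≤ c + j + 1 ∧ ∀ k < j + 1, (j : Int) + 1 - L ≤ (k : Int) → xs.getD k ' ' ≠ '.')

theorem pRun_succ (L c : Int) (hc : 0 ≤ c) (x : Char) (xs : List Char) (j : Nat) :
    pRun L c (x :: xs) (j+1) = pRun L (if x ≠ '.' then c + 1 else 0) xs j := by
  simp only [pRun, decide_eq_decide]
  by_cases hx : x = '.'
  · subst hx
    rw [if_neg (by simp)]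
    constructor
    · rintro ⟨h1, h2⟩
      refine ⟨?_, ?_⟩
      · by_contra hL
        exact h2 0 (by omega) (by push_cast; omega) (by simp)
      · intro k hk hg
        have := h2 (k+1) (by omega) (by push_cast at hg ⊢; omega)
        simpa using this
    · rintro ⟨h1, h2⟩
      refine ⟨by omega, ?_⟩
      intro k hk hg
      cases k with
      | zero => exact absurd hg (by push_cast; omega)
      | succ k' =>
        have := h2 k' (by omega) (by push_cast at hg ⊢; omega)
        simpa using this
  · rw [if_pos hx]
    constructor
    · rintro ⟨h1, h2⟩
      refine ⟨by omega, ?_⟩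
      intro k hk hg
      have := h2 (k+1) (by omega) (by push_cast at hg ⊢; omega)
      simpa using this
    · rintro ⟨h1, h2⟩
      refine ⟨by omega, ?_⟩
      intro k hk hg
      cases k with
      | zero => simpa using hx
      | succ k' =>
        have := h2 k' (by omega) (by push_cast at hg ⊢; omega)
        simpa using this

theorem pRun_zero (L c : Int) (hc : 0 ≤ c) (x : Char) (xs : List Char) :
    pRun L c (x :: xs) 0 = decide ((if x ≠ '.' then c + 1 else 0) ≥ L) := by
  simp only [pRun, decide_eq_decide]
  by_cases hx : x = '.'
  · subst hx
    rw [if_neg (by simp)]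
    constructor
    · rintro ⟨h1, h2⟩
      by_contra hL
      exact h2 0 (by omega) (by push_cast; omega) (by simp)
    · intro h
      exact ⟨by omega, fun k hk hg => by interval_cases k; exact absurd hg (by push_cast; omega)⟩
  · rw [if_pos hx]
    constructor
    · rintro ⟨h1, h2⟩; omega
    · intro h
      refine ⟨by omega, fun k hk hg => ?_⟩
      interval_cases k
      simpa using hx

theorem cfRuns_eq (L : Int) (xs : List Char) : ∀ (c fits : Int), 0 ≤ c →
    cfRuns L xs c fits = fits + ((List.range xs.length).countP (pRun L c xs) : Int) := by
  induction xs with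
  | nil => intro c fits _; simp [cfRuns]
  | cons x rest ih =>
    intro c fits hc
    simp only [cfRuns]
    rw [ih _ _ (by split <;> omega)]
    rw [List.length_cons, countP_range_succ]
    rw [show (fun j => pRun L c (x :: rest) (j+1)) = pRun L (if x ≠ '.' then c + 1 else 0) rest from
      funext (fun j => pRun_succ L c hc x rest j)]
    rw [pRun_zero L c hc x rest]
    simp only [ge_iff_le, decide_eq_true_eq]
    push_cast
    split_ifs <;> omega

theorem cfScan_append (L : Int) (e1 e2 : List (Int × Char)) :
    ∀ st, cfScan L (e1 ++ e2) st =
      match cfScan L e1 st with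
      | none => none
      | some st' => cfScan L e2 st' := by
  induction e1 with
  | nil => intro st; simp [cfScan]
  | cons p rest ih =>
    rintro ⟨fb, lb, gp⟩
    obtain ⟨i, c⟩ := p
    simp only [List.cons_append, cfScan]
    by_cases h1 : c = '.'
    · simp only [if_pos h1]; exact ih _
    by_cases h2 : c = '#'
    · simp only [if_neg h1, if_pos h2]
      cases fb with
      | none => exact ih _
      | some f =>
        by_cases h3 : (gp || decide (i - f + 1 > L)) = true
        · simp only [if_pos h3]
        · simp only [if_neg h3]
          exact ih _
    · simp only [if_neg h1, if_neg h2]; exact ih _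

theorem cfScan_fresh (L : Int) (xs : List Char) (h : '#' ∉ xs) :
    ∀ s : Int, cfScan L (PySem.List.enumerate xs s) (none, none, false) = some (none, none, false) := by
  induction xs with
  | nil => intro s; simp [PySem.List.enumerate_nil, cfScan]
  | cons x rest ih =>
    intro s
    have hx : x ≠ '#' := fun hh => h (hh ▸ List.mem_cons_self ..)
    have hr : '#' ∉ rest := fun hh => h (List.mem_cons_of_mem _ hh)
    rw [PySem.List.enumerate_cons]
    simp only [cfScan]
    by_cases hdot : x = '.'
    · simp only [if_pos hdot, Option.isSome_none, Bool.false_eq_true, if_false]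
      exact ih hr _
    · simp only [if_neg hdot, if_neg hx]
      exact ih hr _

def lastHash? : List Char → Option Nat
  | [] => none
  | x :: t =>
    match lastHash? t with
    | some m => some (m+1)
    | none => if x = '#' then some 0 else none

theorem getD_ne_of_not_mem (t : List Char) (k : Nat) (h : '#' ∉ t) : t.getD k ' ' ≠ '#' := by
  by_cases hk : k < t.length
  · rw [List.getD_eq_getElem t ' ' hk]
    intro hh
    exact h (hh ▸ List.getElem_mem hk)
  · rw [List.getD_eq_default t ' ' (by omega)]
    simp

theorem lastHash?_eq_none_iff (xs : List Char) : lastHash? xs = none ↔ '#' ∉ xs := by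
  induction xs with
  | nil => simp [lastHash?]
  | cons x t ih =>
    simp only [lastHash?]
    cases h : lastHash? t with
    | some m => simp [← ih, h]
    | none =>
      by_cases hx : x = '#'
      · simp [hx]
      · simp [hx, ← ih, h, eq_comm]

theorem lastHash?_spec (xs : List Char) : ∀ m, lastHash? xs = some m →
    m < xs.length ∧ xs.getD m ' ' = '#' ∧ ∀ d, m < d → xs.getD d ' ' ≠ '#' := by
  induction xs with
  | nil => intro m h; simp [lastHash?] at h
  | cons x t ih =>
    intro m h
    simp only [lastHash?] at h
    cases hlt : lastHash? t with
    | some m' =>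
      rw [hlt] at h
      obtain rfl : m = m' + 1 := by simpa using h.symm
      obtain ⟨h1, h2, h3⟩ := ih m' hlt
      refine ⟨by simpa using h1, by simpa using h2, ?_⟩
      intro d hd
      cases d with
      | zero => omega
      | succ d' => simpa using h3 d' (by omega)
    | none =>
      rw [hlt] at h
      by_cases hx : x = '#'
      · rw [if_pos hx] at h
        obtain rfl : m = 0 := by simpa using h.symm
        refine ⟨by simp, by simpa using hx, ?_⟩
        intro d hd
        cases d with
        | zero => omega
        | succ d' =>
          have : '#' ∉ t := (lastHash?_eq_none_iff t).mp hlt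
          simpa using getD_ne_of_not_mem t d' this
      · rw [if_neg hx] at h; simp at h

theorem countP_range_shift (n a m : Nat) (p : Nat → Bool) (hmn : a + m ≤ n)
    (hout : ∀ j, j < n → p j = true → a ≤ j ∧ j < a + m) :
    (List.range n).countP p = (List.range m).countP (fun j' => p (a + j')) := by
  have h1 : List.range' 0 a 1 ++ List.range' a m 1 = List.range' 0 (a+m) 1 := by
    have := List.range'_append (s := 0) (m := a) (n := m) (step := 1)
    simpa using this
  have h2 : List.range' 0 (a+m) 1 ++ List.range' (a+m) (n-a-m) 1 = List.range' 0 n 1 := by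
    have := List.range'_append (s := 0) (m := a+m) (n := n-a-m) (step := 1)
    simp only [Nat.zero_add, Nat.one_mul] at this
    rw [this]
    congr 1
    omega
  have hsplit : List.range n = List.range' 0 a ++ List.range' a m ++ List.range' (a+m) (n-a-m) := by
    rw [List.range_eq_range', ← h2, ← h1, List.append_assoc]
  rw [hsplit, List.countP_append, List.countP_append]
  have z1 : (List.range' 0 a).countP p = 0 := by
    rw [List.countP_eq_zero]
    intro x hx hp
    rw [List.mem_range'] at hx
    obtain ⟨i, hi, rfl⟩ := hx
    have := hout _ (by omega) hp
    omega
  have z2 : (List.range' (a+m) (n-a-m)).countP p = 0 := by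
    rw [List.countP_eq_zero]
    intro x hx hp
    rw [List.mem_range'] at hx
    obtain ⟨i, hi, rfl⟩ := hx
    have := hout _ (by omega) hp
    omega
  rw [z1, z2, List.range'_eq_map_range, List.countP_map]
  simp [Function.comp_def]

theorem cfScan_seen_none_iff (L : Int) (xs : List Char) : ∀ (s f c : Int) (gp : Bool),
    (cfScan L (PySem.List.enumerate xs s) (some f, some c, gp) = none ↔
      ∃ p : Nat, xs.getD p ' ' = '#' ∧
        ((gp = true ∨ ∃ d : Nat, d < p ∧ xs.getD d ' ' = '.') ∨ s + p - f + 1 > L)) := by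
  induction xs with
  | nil =>
    intro s f c gp
    simp [PySem.List.enumerate_nil, cfScan]
  | cons x rest ih =>
    intro s f c gp
    rw [PySem.List.enumerate_cons]
    simp only [cfScan]
    by_cases hdot : x = '.'
    · subst hdot
      rw [if_pos rfl]
      simp only [Option.isSome_some, if_pos]
      rw [ih (s+1) f c true]
      constructor
      · rintro ⟨p, hp, hcond⟩
        refine ⟨p+1, by simpa using hp, ?_⟩
        rcases hcond with h | h
        · exact Or.inl (Or.inr ⟨0, by omega, by simp⟩)
        · right; push_cast at h ⊢; omega
      · rintro ⟨p, hp, hcond⟩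
        cases p with
        | zero => simp at hp
        | succ p' =>
          refine ⟨p', by simpa using hp, ?_⟩
          rcases hcond with h | h
          · exact Or.inl (Or.inl rfl)
          · right; push_cast at h ⊢; omega
    · by_cases hhash : x = '#'
      · subst hhash
        rw [if_neg hdot, if_pos rfl]
        by_cases hfail : gp = true ∨ s - f + 1 > L
        · rw [if_pos (by rcases hfail with h | h <;> simp [h])]
          refine iff_of_true rfl ⟨0, by simp, ?_⟩
          rcases hfail with h | h
          · exact Or.inl (Or.inl h)
          · right; push_cast; omega
        · have hgp : gp = false := by
            rcases Bool.eq_false_or_eq_true gp with h | h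
            · exact absurd (Or.inl h) hfail
            · exact h
          have hspan : ¬ (s - f + 1 > L) := fun h => hfail (Or.inr h)
          rw [if_neg (by simp [hgp]; omega)]
          rw [ih (s+1) f s gp]
          constructor
          · rintro ⟨p, hp, hcond⟩
            refine ⟨p+1, by simpa using hp, ?_⟩
            rcases hcond with (h | ⟨d, hd, hdot'⟩) | h
            · exact Or.inl (Or.inl h)
            · exact Or.inl (Or.inr ⟨d+1, by omega, by simpa using hdot'⟩)
            · right; push_cast at h ⊢; omega
          · rintro ⟨p, hp, hcond⟩
            cases p with
            | zero =>
              exfalso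
              rcases hcond with (h | ⟨d, hd, _⟩) | h
              · rw [hgp] at h; simp at h
              · omega
              · push_cast at h; omega
            | succ p' =>
              refine ⟨p', by simpa using hp, ?_⟩
              rcases hcond with (h | ⟨d, hd, hdot'⟩) | h
              · exact Or.inl (Or.inl h)
              · refine Or.inl (Or.inr ?_)
                cases d with
                | zero => simp at hdot'
                | succ d' => exact ⟨d', by omega, by simpa using hdot'⟩
              · right; push_cast at h ⊢; omega
      · rw [if_neg hdot, if_neg hhash]
        rw [ih (s+1) f c gp]
        constructor
        · rintro ⟨p, hp, hcond⟩
          refine ⟨p+1, by simpa using hp, ?_⟩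
          rcases hcond with (h | ⟨d, hd, hdot'⟩) | h
          · exact Or.inl (Or.inl h)
          · exact Or.inl (Or.inr ⟨d+1, by omega, by simpa using hdot'⟩)
          · right; push_cast at h ⊢; omega
        · rintro ⟨p, hp, hcond⟩
          cases p with
          | zero => exact absurd (by simpa using hp) hhash
          | succ p' =>
            refine ⟨p', by simpa using hp, ?_⟩
            rcases hcond with (h | ⟨d, hd, hdot'⟩) | h
            · exact Or.inl (Or.inl h)
            · refine Or.inl (Or.inr ?_)
              cases d with
              | zero => exact absurd (by simpa using hdot') hdot
              | succ d' => exact ⟨d', by omega, by simpa using hdot'⟩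
            · right; push_cast at h ⊢; omega

theorem cfScan_seen_some (L : Int) (xs : List Char) : ∀ (s f c : Int) (gp : Bool) (fb lb : Option Int) (g' : Bool),
    cfScan L (PySem.List.enumerate xs s) (some f, some c, gp) = some (fb, lb, g') →
    fb = some f ∧ ∃ l' : Int, lb = some l' ∧
      l' = (match lastHash? xs with | none => c | some m => s + (m : Int)) := by
  induction xs with
  | nil =>
    intro s f c gp fb lb g' h
    simp only [PySem.List.enumerate_nil, cfScan, Option.some_inj] at h
    obtain ⟨h1, h2, h3⟩ := Prod.mk.injEq .. ▸ h
    exact ⟨h1.symm ▸ rfl, c, by simp_all [lastHash?]⟩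
  | cons x rest ih =>
    intro s f c gp fb lb g' h
    rw [PySem.List.enumerate_cons] at h
    simp only [cfScan] at h
    by_cases hdot : x = '.'
    · rw [if_pos hdot] at h
      simp only [Option.isSome_some, if_pos] at h
      obtain ⟨h1, l', h2, h3⟩ := ih (s+1) f c true fb lb g' h
      refine ⟨h1, l', h2, ?_⟩
      subst hdot
      cases hlh : lastHash? rest with
      | none => simp [lastHash?, hlh] at h3 ⊢; simpa using h3
      | some m => simp [lastHash?, hlh] at h3 ⊢; rw [h3]; push_cast; ring
    · by_cases hhash : x = '#'
      · rw [if_neg hdot, if_pos hhash] at h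
        rcases hif : (gp || decide (s - f + 1 > L)) with _ | _
        · rw [hif] at h
          simp only [Bool.false_eq_true, if_false] at h
          obtain ⟨h1, l', h2, h3⟩ := ih (s+1) f s gp fb lb g' h
          refine ⟨h1, l', h2, ?_⟩
          subst hhash
          cases hlh : lastHash? rest with
          | none => simp [lastHash?, hlh] at h3 ⊢; omega
          | some m => simp [lastHash?, hlh] at h3 ⊢; rw [h3]; push_cast; ring
        · rw [hif] at h; simp at h
      · rw [if_neg hdot, if_neg hhash] at h
        obtain ⟨h1, l', h2, h3⟩ := ih (s+1) f c gp fb lb g' h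
        refine ⟨h1, l', h2, ?_⟩
        cases hlh : lastHash? rest with
        | none => simp [lastHash?, hlh, hhash] at h3 ⊢; simpa using h3
        | some m => simp [lastHash?, hlh] at h3 ⊢; rw [h3]; push_cast; ring

theorem fitsCount_zero (L : Int) (cs : List Char) (hL : L ≤ 0) (q : Nat)
    (hq : q < cs.length) (hh : cs.getD q ' ' = '#') : fitsCount L cs = 0 := by
  unfold fitsCount
  have : (List.range cs.length).countP (fitsAt L cs) = 0 := by
    rw [List.countP_eq_zero]
    intro j hj hfit
    obtain ⟨h1, h2, h3⟩ := of_decide_eq_true hfit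
    have := h3 q hq hh
    omega
  rw [this]
  rfl

theorem area_eq_fitsCount (L : Int) (cs : List Char) (f ℓ : Nat)
    (hflen : f < cs.length) (hgetf : cs.getD f ' ' = '#')
    (hfℓ : f ≤ ℓ) (hℓlen : ℓ < cs.length) (hgetℓ : cs.getD ℓ ' ' = '#')
    (hub : ∀ k, k < cs.length → cs.getD k ' ' = '#' → f ≤ k ∧ k ≤ ℓ)
    (hnd : (f : Int) + L < 0 → (cs.length : Int) + 2*L - 1 ≤ 0) :
    cfRuns L (PySem.List.slice cs (some (max 0 ((ℓ : Int) - L + 1))) (some ((f : Int) + L))) 0 0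
      = fitsCount L cs := by
  by_cases hL : 1 ≤ L
  · rw [PySem.List.slice_toNat cs (le_max_left 0 _) (by omega)]
    set n := cs.length with hn_def
    set aN := (max 0 ((ℓ : Int) - L + 1)).toNat with haN_def
    set bN := ((f : Int) + L).toNat with hbN_def
    have haNI : (aN : Int) = max 0 ((ℓ : Int) - L + 1) := by
      rw [haN_def, Int.toNat_of_nonneg (le_max_left 0 _)]
    have haN2 : (aN : Int) ≤ (ℓ : Int) := by omega
    have hbNI : (bN : Int) = (f : Int) + L := by
      rw [hbN_def, Int.toNat_of_nonneg (by omega)]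
    set area := (cs.drop aN).take (bN - aN) with harea_def
    have hm : area.length = min (bN - aN) (n - aN) := by
      rw [harea_def, List.length_take, List.length_drop]
    have harea_get : ∀ k, k < area.length → area.getD k ' ' = cs.getD (aN + k) ' ' := by
      intro k hk
      have hkn : aN + k < n := by
        rw [hm] at hk
        have := Nat.lt_min.mp hk
        omega
      rw [List.getD_eq_getElem _ _ hk, List.getD_eq_getElem _ _ hkn]
      simp only [harea_def, List.getElem_take, List.getElem_drop]
    have hout : ∀ j, j < n → fitsAt L cs j = true → aN ≤ j ∧ j < aN + min (bN - aN) (n - aN) := by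
      intro j hj hfit
      obtain ⟨h1, h2, h3⟩ := of_decide_eq_true hfit
      obtain ⟨hbf1, hbf2⟩ := h3 f hflen hgetf
      obtain ⟨hbl1, hbl2⟩ := h3 ℓ hℓlen hgetℓ
      have hjb : j < bN := by omega
      have hja : aN ≤ j := by omega
      have hmin : j - aN < min (bN - aN) (n - aN) := Nat.lt_min.mpr ⟨by omega, by omega⟩
      exact ⟨hja, by omega⟩
    rw [cfRuns_eq L area 0 0 le_rfl]
    unfold fitsCount
    rw [countP_range_shift n aN (min (bN - aN) (n - aN)) (fitsAt L cs)
      (by have := Nat.min_le_right (bN - aN) (n - aN); omega) hout]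
    rw [hm]
    have hpoint : ∀ j' ∈ List.range (min (bN - aN) (n - aN)),
        pRun L 0 area j' = true ↔ fitsAt L cs (aN + j') = true := by
      intro j' hj'
      have hj'm : j' < min (bN - aN) (n - aN) := List.mem_range.mp hj'
      have hj'1 : j' < bN - aN := lt_of_lt_of_le hj'm (Nat.min_le_left _ _)
      have hj'2 : j' < n - aN := lt_of_lt_of_le hj'm (Nat.min_le_right _ _)
      simp only [pRun, fitsAt, decide_eq_true_eq]
      constructor
      · rintro ⟨h1, h2⟩
        refine ⟨by omega, ?_, ?_⟩
        · intro k hk hg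
          have hka : aN ≤ k := by omega
          have h2' := h2 (k - aN) (by omega) (by omega)
          rw [harea_get (k - aN) (by rw [hm]; exact Nat.lt_min.mpr ⟨by omega, by omega⟩)] at h2'
          rw [show aN + (k - aN) = k by omega] at h2'
          exact h2'
        · intro p hp hh
          obtain ⟨hp1, hp2⟩ := hub p hp hh
          constructor <;> omega
      · rintro ⟨h1, h2, h3⟩
        obtain ⟨hbf1, hbf2⟩ := h3 f hflen hgetf
        obtain ⟨hbl1, hbl2⟩ := h3 ℓ hℓlen hgetℓ
        refine ⟨by omega, ?_⟩
        intro k hk hg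
        have h2' := h2 (aN + k) (by omega) (by omega)
        rw [harea_get k (by rw [hm]; exact Nat.lt_min.mpr ⟨by omega, by omega⟩)]
        exact h2'
    rw [List.countP_congr hpoint]
    simp
  · have hfits0 : fitsCount L cs = 0 := fitsCount_zero L cs (by omega) f hflen hgetf
    rw [hfits0]
    have hlen0 : (PySem.List.slice cs (some (max 0 ((ℓ : Int) - L + 1))) (some ((f : Int) + L))).length = 0 := by
      rw [PySem.List.length_slice]
      rw [show max 0 ((ℓ : Int) - L + 1) = ((((ℓ : Int) - L + 1).toNat : Nat) : Int) by omega]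
      rw [PySem.List.clampIdx_natCast]
      by_cases hb : (f : Int) + L < 0
      · have h2 := hnd hb
        rw [show (f : Int) + L = -(((-(f : Int) - L).toNat : Nat) : Int) by omega]
        rw [PySem.List.clampIdx_neg_natCast _ _ (by omega)]
        omega
      · rw [show (f : Int) + L = ((((f : Int) + L).toNat : Nat) : Int) by omega]
        rw [PySem.List.clampIdx_natCast]
        omega
    rw [List.length_eq_zero_iff.mp hlen0]
    simp [cfRuns]

theorem split_first_hash (cs : List Char) (hmem : '#' ∈ cs) :
    ∃ u v, cs = u ++ '#' :: v ∧ '#' ∉ u := by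
  induction cs with
  | nil => simp at hmem
  | cons x rest ih =>
    by_cases hx : x = '#'
    · exact ⟨[], rest, by simp [hx], by simp⟩
    · have hmem' : '#' ∈ rest := by
        rcases List.mem_cons.mp hmem with h | h
        · exact absurd h.symm hx
        · exact h
      obtain ⟨u, v, hcs, hu⟩ := ih hmem'
      exact ⟨x :: u, v, by simp [hcs], by simp [hu, eq_comm, hx]⟩

theorem getD_append_hash (u v : List Char) (p : Nat) :
    (u ++ '#' :: v).getD (u.length + 1 + p) ' ' = v.getD p ' ' := by
  rw [List.getD_append_right u _ ' ' (u.length + 1 + p) (by omega)]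
  rw [show u.length + 1 + p - u.length = p + 1 by omega]
  simp

theorem hash_index_cases (u v : List Char) (hu : '#' ∉ u) :
    ∀ k, (u ++ '#' :: v).getD k ' ' = '#' →
      k = u.length ∨ ∃ p, k = u.length + 1 + p ∧ v.getD p ' ' = '#' := by
  intro k hk
  rcases lt_trichotomy k u.length with hlt | heq | hgt
  · exfalso
    rw [List.getD_append _ _ _ _ hlt] at hk
    exact getD_ne_of_not_mem u k hu hk
  · exact Or.inl heq
  · right
    refine ⟨k - u.length - 1, by omega, ?_⟩
    rw [show k = u.length + 1 + (k - u.length - 1) by omega] at hk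
    rw [getD_append_hash] at hk
    exact hk

theorem scan_to_seen (L : Int) (u v : List Char) (hu : '#' ∉ u) :
    cfScan L (PySem.List.enumerate (u ++ '#' :: v) 0) (none, none, false)
      = cfScan L (PySem.List.enumerate v ((u.length : Int) + 1))
          (some (u.length : Int), some (u.length : Int), false) := by
  rw [PySem.List.enumerate_append, cfScan_append, cfScan_fresh L u hu 0]
  rw [PySem.List.enumerate_cons]
  simp [cfScan]

theorem a_eq_fitsCount (record : String) (L : Int) (hD : ¬ D_count_fits record L) :
    count_fits record L = fitsCount L record.toList := by
  unfold count_fits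
  by_cases hmem : '#' ∈ record.toList
  case neg =>
    rw [cfScan_fresh L record.toList hmem 0]
    show cfRuns L record.toList 0 0 = fitsCount L record.toList
    rw [cfRuns_eq L record.toList 0 0 le_rfl]
    unfold fitsCount
    have hcongr : ∀ j ∈ List.range record.toList.length,
        pRun L 0 record.toList j = true ↔ fitsAt L record.toList j = true := by
      intro j hj
      simp only [pRun, fitsAt, decide_eq_true_eq]
      constructor
      · rintro ⟨h1, h2⟩
        refine ⟨by omega, fun k hk hg => h2 k hk (by omega), fun p hp hh => ?_⟩
        exfalso
        apply hmem
        rw [List.getD_eq_getElem _ _ hp] at hh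
        exact hh ▸ List.getElem_mem hp
      · rintro ⟨h1, h2, h3⟩
        exact ⟨by omega, fun k hk hg => h2 k hk (by omega)⟩
    rw [List.countP_congr hcongr]
    simp
  case pos =>
    obtain ⟨u, v, hcseq, hu⟩ := split_first_hash record.toList hmem
    unfold D_count_fits at hD
    rw [hcseq] at hD ⊢
    set cs : List Char := u ++ '#' :: v with hcs2
    set f := u.length with hf_def
    have hflen : f < cs.length := by rw [hcs2]; simp [hf_def]
    have hgetf : cs.getD f ' ' = '#' := by
      rw [hcs2, List.getD_append_right u _ ' ' f (le_refl _)]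
      simp [hf_def]
    rw [scan_to_seen L u v hu]
    have hhashcase := hash_index_cases u v hu
    cases hscan : cfScan L (PySem.List.enumerate v ((u.length : Int) + 1))
        (some (u.length : Int), some (u.length : Int), false) with
    | none =>
      obtain ⟨p, hp, hcond⟩ :=
        (cfScan_seen_none_iff L v ((u.length : Int) + 1) (u.length : Int) (u.length : Int) false).mp hscan
      have hpn : f + 1 + p < cs.length := by
        have hpv : p < v.length := by
          by_contra hpv
          rw [List.getD_eq_default _ _ (by omega)] at hp
          simp at hp
        rw [hcs2]
        simp [hf_def]
        omega
      have hcs_p : cs.getD (f + 1 + p) ' ' = '#' := by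
        rw [hcs2, hf_def, getD_append_hash]
        exact hp
      symm
      unfold fitsCount
      have h0 : (List.range cs.length).countP (fitsAt L cs) = 0 := by
        rw [List.countP_eq_zero]
        intro j hj hfit
        obtain ⟨h1, h2, h3⟩ := of_decide_eq_true hfit
        have hj' : j < cs.length := List.mem_range.mp hj
        obtain ⟨hb11, hb12⟩ := h3 f hflen hgetf
        obtain ⟨hb21, hb22⟩ := h3 (f + 1 + p) hpn hcs_p
        rcases hcond with (hgp | ⟨d, hd, hdot⟩) | hspan
        · simp at hgp
        · have hdn : f + 1 + d < cs.length := by omega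
          have hcs_d : cs.getD (f + 1 + d) ' ' = '.' := by
            rw [hcs2, hf_def, getD_append_hash]
            exact hdot
          exact h2 (f + 1 + d) (by omega) (by push_cast; omega) hcs_d
        · omega
      rw [h0]
      rfl
    | some st =>
      obtain ⟨fb, lb, g'⟩ := st
      obtain ⟨hfb, l', hlb, hl'⟩ :=
        cfScan_seen_some L v ((u.length : Int) + 1) (u.length : Int) (u.length : Int) false fb lb g' hscan
      rw [hfb, hlb]
      have hnofail : ¬ ∃ p : Nat, v.getD p ' ' = '#' ∧
          ((false = true ∨ ∃ d : Nat, d < p ∧ v.getD d ' ' = '.') ∨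
            (u.length : Int) + 1 + p - (u.length : Int) + 1 > L) := by
        rw [← cfScan_seen_none_iff L v ((u.length : Int) + 1) (u.length : Int) (u.length : Int) false]
        rw [hscan]
        simp
      cases hlh : lastHash? v with
      | none =>
        have hvno : '#' ∉ v := (lastHash?_eq_none_iff v).mp hlh
        have hl'f : l' = (f : Int) := by
          rw [hl']
          simp [hlh, hf_def]
        have hub : ∀ k, k < cs.length → cs.getD k ' ' = '#' → f ≤ k ∧ k ≤ f := by
          intro k hk hh
          rcases hhashcase k (by rw [← hcs2]; exact hh) with heq | ⟨p, rfl, hp⟩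
          · omega
          · exact absurd hp (getD_ne_of_not_mem v p hvno)
        have hcount : cs.count '#' = 1 := by
          rw [hcs2, List.count_append]
          rw [List.count_eq_zero.mpr hu]
          simp [List.count_eq_zero.mpr hvno]
        have hnd : (f : Int) + L < 0 → (cs.length : Int) + 2 * L - 1 ≤ 0 := by
          intro hneg
          by_contra hpos
          apply hD
          refine ⟨by omega, hcount, ?_, by omega⟩
          intro k hk hh
          have := hub k hk hh
          have hkf : k = f := by omega
          rw [hkf]
          exact hneg
        rw [hl'f]
        exact area_eq_fitsCount L cs f f hflen hgetf le_rfl hflen hgetf hub hnd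
      | some m =>
        obtain ⟨hmlen, hmget, hmlast⟩ := lastHash?_spec v m hlh
        have hl'ℓ : l' = ((f + 1 + m : Nat) : Int) := by
          rw [hl']
          simp [hlh, hf_def]
        have hL2 : (2 : Int) ≤ L := by
          by_contra hL2
          exact hnofail ⟨m, hmget, Or.inr (by push_cast; omega)⟩
        have hℓlen : f + 1 + m < cs.length := by
          rw [hcs2]
          simp [hf_def]
          omega
        have hgetℓ : cs.getD (f + 1 + m) ' ' = '#' := by
          rw [hcs2, hf_def, getD_append_hash]
          exact hmget
        have hub : ∀ k, k < cs.length → cs.getD k ' ' = '#' → f ≤ k ∧ k ≤ f + 1 + m := by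
          intro k hk hh
          rcases hhashcase k (by rw [← hcs2]; exact hh) with heq | ⟨p, rfl, hp⟩
          · omega
          · have hpm : p ≤ m := by
              by_contra hpm
              exact hmlast p (by omega) hp
            omega
        have hnd : (f : Int) + L < 0 → (cs.length : Int) + 2 * L - 1 ≤ 0 := by
          intro hneg
          exfalso
          omega
        rw [hl'ℓ]
        exact area_eq_fitsCount L cs f (f + 1 + m) hflen hgetf (by omega) hℓlen hgetℓ hub hnd

theorem cfRuns_len (L : Int) (hL : L < 0) (xs : List Char) : cfRuns L xs 0 0 = (xs.length : Int) := by
  rw [cfRuns_eq L xs 0 0 le_rfl]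
  have h : (List.range xs.length).countP (pRun L 0 xs) = (List.range xs.length).length := by
    rw [List.countP_eq_length]
    intro j hj
    exact decide_eq_true ⟨by omega, fun k hk hg => absurd hg (by omega)⟩
  rw [h, List.length_range]
  omega

theorem a_val_in_D (record : String) (L : Int) (hD : D_count_fits record L) :
    count_fits record L = (record.toList.length : Int) + 2 * L - 1 := by
  obtain ⟨hL, hcount, hallneg, hpos⟩ := hD
  have hmem : '#' ∈ record.toList := by
    rw [← List.count_pos_iff]
    omega
  unfold count_fits
  obtain ⟨u, v, hcseq, hu⟩ := split_first_hash record.toList hmem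
  rw [hcseq] at hallneg hcount hpos ⊢
  set cs : List Char := u ++ '#' :: v with hcs2
  set f := u.length with hf_def
  have hflen : f < cs.length := by rw [hcs2]; simp [hf_def]
  have hgetf : cs.getD f ' ' = '#' := by
    rw [hcs2, List.getD_append_right u _ ' ' f (le_refl _)]
    simp [hf_def]
  have hvno : '#' ∉ v := by
    intro hv
    have h2 : 0 < v.count '#' := List.count_pos_iff.mpr hv
    have : 2 ≤ cs.count '#' := by
      rw [hcs2, List.count_append]
      simp
      omega
    omega
  have hfneg : (f : Int) + L < 0 := hallneg f hflen hgetf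
  rw [scan_to_seen L u v hu]
  cases hscan : cfScan L (PySem.List.enumerate v ((u.length : Int) + 1))
      (some (u.length : Int), some (u.length : Int), false) with
  | none =>
    exfalso
    obtain ⟨p, hp, _⟩ :=
      (cfScan_seen_none_iff L v ((u.length : Int) + 1) (u.length : Int) (u.length : Int) false).mp hscan
    have hpv : p < v.length := by
      by_contra h
      rw [List.getD_eq_default _ _ (by omega)] at hp
      simp at hp
    apply hvno
    rw [List.getD_eq_getElem _ _ hpv] at hp
    exact hp ▸ List.getElem_mem hpv
  | some st =>
    obtain ⟨fb, lb, g'⟩ := st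
    obtain ⟨hfb, l', hlb, hl'⟩ :=
      cfScan_seen_some L v ((u.length : Int) + 1) (u.length : Int) (u.length : Int) false fb lb g' hscan
    rw [hfb, hlb]
    have hlh : lastHash? v = none := (lastHash?_eq_none_iff v).mpr hvno
    have hl'f : l' = (f : Int) := by
      rw [hl']
      simp [hlh, hf_def]
    rw [hl'f]
    show cfRuns L (PySem.List.slice cs (some (max 0 ((f : Int) - L + 1))) (some ((f : Int) + L))) 0 0
      = (cs.length : Int) + 2 * L - 1
    rw [cfRuns_len L hL _]
    rw [PySem.List.length_slice]
    rw [show max 0 ((f : Int) - L + 1) = ((((f : Int) - L + 1).toNat : Nat) : Int) by omega]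
    rw [PySem.List.clampIdx_natCast]
    rw [show (f : Int) + L = -(((-(f : Int) - L).toNat : Nat) : Int) by omega]
    rw [PySem.List.clampIdx_neg_natCast _ _ (by omega)]
    omega

theorem a_ne_fits_in_D (record : String) (L : Int) (hD : D_count_fits record L) :
    count_fits record L ≠ fitsCount L record.toList := by
  rw [a_val_in_D record L hD]
  obtain ⟨hL, hcount, hallneg, hpos⟩ := hD
  have hmem : '#' ∈ record.toList := by
    rw [← List.count_pos_iff]
    omega
  obtain ⟨q, hq, hget⟩ := List.mem_iff_getElem.mp hmem
  rw [fitsCount_zero L record.toList (by omega) q hq (by rw [List.getD_eq_getElem _ _ hq]; exact hget)]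
  omega


-- ===== VERDICT (by name: the statement is the Claim_ definition above) =====
theorem count_fits_spec : Claim_unchanged_count_fits := by
  intro record L _ hD
  rw [a_eq_fitsCount record L hD, alt_eq_fitsCount record L]

theorem count_fits_changed : Claim_changed_count_fits := by
  unfold Claim_changed_count_fits; decide

theorem count_fits_tight : Claim_exact_count_fits := by
  intro record L _ hD
  rw [alt_eq_fitsCount record L]
  exact a_ne_fits_in_D record L hD
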